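-- pv_equiv track=rewrite | github.com/SilentSpringInstitute/WWBC_DB_exposome | sources/py/toolbox/toolbox.py | formatLineDataset
-- ===== SOURCE A (Python) =====
-- def formatLineDataset(linein):
--
--     linein = linein.replace("\n", "")
--     linenew = ""
--
--     imax = len(linein)
--     i = 0
--     flagchar = 0
--     while i < imax:
--         if linein[i] == '"' and flagchar == 0:
--             flagchar = 1
--         elif linein[i] == '"' and flagchar == 1:
--             flagchar = 0
--
--         if flagchar == 1 and linein[i] == ",":
--             linenew = linenew + " "
--         else:
--             linenew = linenew + linein[i]
--         i += 1
--
--     linenew = linenew.replace('\"', "")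
--     return linenew
-- ===== SOURCE B (Python) =====
-- def formatLineDataset(linein):
--     parts = linein.replace("\n", "").split('"')
--     out = []
--     for i, p in enumerate(parts):
--         out.append(p.replace(",", " ") if i % 2 else p)
--     return "".join(out)
-- ===== Notes on version B (the rewrite author's own statement) =====
-- stated objective: faster
-- what changed: Replaces A's stateful character-by-character flag scan with quadratic per-character string concatenation (plus a final quote-stripping replace) by a split on the double-quote character, a parity-indexed comma-to-space substitution on the odd (inside-quotes) segments, and a single join.
import Mathlib
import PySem

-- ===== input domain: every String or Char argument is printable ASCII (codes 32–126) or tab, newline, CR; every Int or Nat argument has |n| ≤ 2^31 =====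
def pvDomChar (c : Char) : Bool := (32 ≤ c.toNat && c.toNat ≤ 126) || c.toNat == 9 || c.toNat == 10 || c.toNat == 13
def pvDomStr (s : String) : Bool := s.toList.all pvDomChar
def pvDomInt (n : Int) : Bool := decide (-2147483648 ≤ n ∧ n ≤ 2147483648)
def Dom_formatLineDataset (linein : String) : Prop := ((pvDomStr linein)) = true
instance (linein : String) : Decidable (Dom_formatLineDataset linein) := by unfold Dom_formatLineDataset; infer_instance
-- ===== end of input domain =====

-- B replaces A's char-by-char flag scan (quadratic per-character string concatenation) with a
-- split on the double-quote character, a parity-indexed comma→space substitution on the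
-- quoted segments, and a single join (objective: faster, measured).

-- ===== PORT A =====
-- A's while loop over the characters, carrying flagchar and the accumulated linenew.
def pvALoop : List Char → Nat → List Char → List Char
  | [], _, linenew => linenew
  | c :: rest, flagchar, linenew =>
    let flagchar' := if c == '"' && flagchar == 0 then 1
      else if c == '"' && flagchar == 1 then 0 else flagchar
    let linenew' := if flagchar' == 1 && c == ',' then linenew ++ [' '] else linenew ++ [c]
    pvALoop rest flagchar' linenew'

def formatLineDataset (linein : String) : String :=
  let linein' := PySem.Str.replace linein "\n" ""
  let linenew := pvALoop linein'.toList 0 []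
  String.mk (PySem.Chars.replace linenew ['"'] [])

-- ===== PORT B =====
def formatLineDataset_alt (linein : String) : String :=
  let parts := PySem.Chars.splitOn (PySem.Str.replace linein "\n" "").toList ['"']
  let out := (PySem.List.enumerate parts).map
      (fun ip => if PySem.Int.mod ip.1 2 != 0 then PySem.Chars.replace ip.2 [','] [' '] else ip.2)
  String.mk (PySem.Chars.join [] out)

-- ===== PRECONDITION & SPEC =====
def Spec_formatLineDataset (linein : String) (out : String) : Prop := out = formatLineDataset_alt linein
instance (linein : String) (out : String) : Decidable (Spec_formatLineDataset linein out) := by unfold Spec_formatLineDataset; infer_instance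

-- ===== CLAIM (what is proved, stated in full; the proofs are below) =====
def Claim_equal_formatLineDataset : Prop := ∀ (linein : String), Dom_formatLineDataset linein → Spec_formatLineDataset linein (formatLineDataset linein)

-- ===== LEMMAS AND PROOFS =====

-- the common value of both sides: A's scan with the quotes removed
def pvBspec : Bool → List Char → List Char
  | _, [] => []
  | b, c :: l => if c == '"' then pvBspec (!b) l
      else (if b && c == ',' then ' ' else c) :: pvBspec b l

-- functional description of split('"')
def pvSplit (pre : List Char) : List Char → List (List Char)
  | [] => [pre]
  | c :: l => if c == '"' then pre :: pvSplit [] l else pvSplit (pre ++ [c]) l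

theorem pv_join_nil_flatten (parts : List (List Char)) :
    PySem.Chars.join [] parts = parts.flatten := by
  induction parts with
  | nil => simp [PySem.Chars.join, List.intercalate]
  | cons p ps ih =>
    cases ps with
    | nil => simp [PySem.Chars.join, List.intercalate]
    | cons q qs =>
      simp only [PySem.Chars.join, List.intercalate, List.intersperse, List.flatten] at *
      simpa using ih

theorem pv_replace_go_quote : ∀ (fuel : Nat) (l acc : List Char), l.length ≤ fuel →
    PySem.Chars.replace.go ['"'] [] fuel l acc
      = acc.reverse ++ l.filter (fun c => !(c == '"')) := by
  intro fuel
  induction fuel with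
  | zero =>
    intro l acc h
    have : l = [] := List.eq_nil_of_length_eq_zero (Nat.le_zero.mp h)
    subst this; simp [PySem.Chars.replace.go]
  | succ n ih =>
    intro l acc h
    cases l with
    | nil => simp [PySem.Chars.replace.go]
    | cons c t =>
      by_cases hc : c = '"'
      · subst hc
        simp only [PySem.Chars.replace.go, List.isPrefixOf, BEq.rfl, Bool.true_and,
          List.length_cons, List.length_nil, List.drop_succ_cons, List.drop_zero, List.reverse_nil, List.nil_append, if_pos]
        rw [ih t acc (by simpa using Nat.le_of_succ_le_succ h)]
        simp
      · have hpre : List.isPrefixOf ['"'] (c :: t) = false := by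
          simp [List.isPrefixOf]; exact fun h' => (hc h'.symm).elim
        simp only [PySem.Chars.replace.go, hpre, Bool.false_eq_true, if_false]
        rw [ih t (c :: acc) (by simpa using Nat.le_of_succ_le_succ h)]
        simp [hc]

theorem pv_replace_go_comma : ∀ (fuel : Nat) (l acc : List Char), l.length ≤ fuel →
    PySem.Chars.replace.go [','] [' '] fuel l acc
      = acc.reverse ++ l.map (fun c => if c == ',' then ' ' else c) := by
  intro fuel
  induction fuel with
  | zero =>
    intro l acc h
    have : l = [] := List.eq_nil_of_length_eq_zero (Nat.le_zero.mp h)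
    subst this; simp [PySem.Chars.replace.go]
  | succ n ih =>
    intro l acc h
    cases l with
    | nil => simp [PySem.Chars.replace.go]
    | cons c t =>
      by_cases hc : c = ','
      · subst hc
        simp only [PySem.Chars.replace.go, List.isPrefixOf, BEq.rfl, Bool.true_and,
          List.length_cons, List.length_nil, List.drop_succ_cons, List.drop_zero, List.reverse_nil, List.nil_append, if_pos]
        rw [ih t ([' '].reverse ++ acc) (by simpa using Nat.le_of_succ_le_succ h)]
        simp
      · have hpre : List.isPrefixOf [','] (c :: t) = false := by
          simp [List.isPrefixOf]; exact fun h' => (hc h'.symm).elim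
        simp only [PySem.Chars.replace.go, hpre, Bool.false_eq_true, if_false]
        rw [ih t (c :: acc) (by simpa using Nat.le_of_succ_le_succ h)]
        simp [hc]

theorem pv_replace_quote (p : List Char) :
    PySem.Chars.replace p ['"'] [] = p.filter (fun c => !(c == '"')) := by
  simp only [PySem.Chars.replace, List.isEmpty]
  rw [pv_replace_go_quote p.length p [] (le_refl _)]
  simp

theorem pv_replace_comma (p : List Char) :
    PySem.Chars.replace p [','] [' '] = p.map (fun c => if c == ',' then ' ' else c) := by
  simp only [PySem.Chars.replace, List.isEmpty]
  rw [pv_replace_go_comma p.length p [] (le_refl _)]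
  simp

theorem pv_splitOn_go : ∀ (fuel : Nat) (l cur : List Char) (acc : List (List Char)),
    l.length ≤ fuel →
    PySem.Chars.splitOn.go ['"'] fuel l cur acc = acc.reverse ++ pvSplit cur.reverse l := by
  intro fuel
  induction fuel with
  | zero =>
    intro l cur acc h
    have : l = [] := List.eq_nil_of_length_eq_zero (Nat.le_zero.mp h)
    subst this; simp [PySem.Chars.splitOn.go, pvSplit]
  | succ n ih =>
    intro l cur acc h
    cases l with
    | nil => simp [PySem.Chars.splitOn.go, pvSplit]
    | cons c t =>
      by_cases hc : c = '"'
      · subst hc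
        simp only [PySem.Chars.splitOn.go, List.isPrefixOf, BEq.rfl, Bool.true_and,
          List.length_cons, List.length_nil, List.drop_succ_cons, List.drop_zero, List.reverse_nil, List.nil_append, if_pos]
        rw [ih t [] (cur.reverse :: acc) (by simpa using Nat.le_of_succ_le_succ h)]
        simp [pvSplit]
      · have hpre : List.isPrefixOf ['"'] (c :: t) = false := by
          simp [List.isPrefixOf]; exact fun h' => (hc h'.symm).elim
        simp only [PySem.Chars.splitOn.go, hpre, Bool.false_eq_true, if_false]
        rw [ih t (c :: cur) acc (by simpa using Nat.le_of_succ_le_succ h)]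
        simp [pvSplit, hc]

theorem pv_splitOn_eq (l : List Char) :
    PySem.Chars.splitOn l ['"'] = pvSplit [] l := by
  simp only [PySem.Chars.splitOn]
  rw [pv_splitOn_go (l.length + 1) l [] [] (Nat.le_succ _)]
  simp

theorem pv_aloop_spec : ∀ (l : List Char) (b : Bool) (acc : List Char),
    (pvALoop l (if b then 1 else 0) acc).filter (fun c => !(c == '"'))
      = acc.filter (fun c => !(c == '"')) ++ pvBspec b l := by
  intro l
  induction l with
  | nil => intro b acc; simp [pvALoop, pvBspec]
  | cons c t ih =>
    intro b acc
    by_cases hc : c = '"'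
    · subst hc
      cases b with
      | false =>
        simpa [pvALoop, pvBspec] using ih true (acc ++ ['"'])
      | true =>
        simpa [pvALoop, pvBspec] using ih false (acc ++ ['"'])
    · cases b with
      | false =>
        simpa [pvALoop, pvBspec, hc] using ih false (acc ++ [c])
      | true =>
        by_cases hcm : c = ','
        · subst hcm
          simpa [pvALoop, pvBspec] using ih true (acc ++ [' '])
        · simpa [pvALoop, pvBspec, hc, hcm] using ih true (acc ++ [c])

theorem pv_mod_two_succ (i : Int) (hi : 0 ≤ i) (b : Bool)
    (h : PySem.Int.mod i 2 = (if b then 1 else 0)) :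
    PySem.Int.mod (i + 1) 2 = (if !b then 1 else 0) := by
  rw [PySem.Int.mod_eq_emod_of_pos (by norm_num)] at h ⊢
  cases b <;> simp_all <;> omega

theorem pv_bside : ∀ (l pre : List Char) (i : Int) (b : Bool), 0 ≤ i →
    PySem.Int.mod i 2 = (if b then 1 else 0) →
    (((PySem.List.enumerate (pvSplit pre l) i)).map
        (fun ip => if PySem.Int.mod ip.1 2 != 0 then PySem.Chars.replace ip.2 [','] [' '] else ip.2)).flatten
      = (if b then pre.map (fun c => if c == ',' then ' ' else c) else pre) ++ pvBspec b l := by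
  intro l
  induction l with
  | nil =>
    intro pre i b hi h
    simp [pvSplit, PySem.List.enumerate, pvBspec, h, pv_replace_comma]
    cases b <;> simp_all
  | cons c t ih =>
    intro pre i b hi h
    by_cases hc : c = '"'
    · subst hc
      simp only [pvSplit, BEq.rfl, if_pos, PySem.List.enumerate_cons, List.map_cons,
        List.flatten_cons, pvBspec]
      rw [ih [] (i + 1) (!b) (by omega) (pv_mod_two_succ i hi b h)]
      simp [h, pv_replace_comma]
      cases b <;> simp_all
    · have hcb : (c == '"') = false := by simpa using hc
      simp only [pvSplit, hcb, pvBspec, Bool.false_eq_true, if_false]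
      rw [ih (pre ++ [c]) i b hi h]
      cases b with
      | false => simp [hc]
      | true =>
        simp only [if_pos, List.map_append, List.append_assoc, Bool.true_and]
        simp [hc]

-- ===== VERDICT (by name: the statement is the Claim_ definition above) =====
theorem formatLineDataset_spec : Claim_equal_formatLineDataset := by
  intro linein _
  unfold Spec_formatLineDataset formatLineDataset formatLineDataset_alt
  apply congrArg String.mk
  rw [pv_replace_quote, pv_splitOn_eq, pv_join_nil_flatten]
  rw [pv_bside _ [] 0 false (le_refl _) (by decide)]
  simpa using pv_aloop_spec (PySem.Str.replace linein "\n" "").toList false []
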